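-- pv_equiv track=rewrite | github.com/bebekim/cellophanemail | tools/sync-repos.py | validate_commit_message
-- ===== SOURCE A (Python) =====
-- def validate_commit_message(message: str) -> str:
--     """Validate and sanitize commit message."""
--     # Remove dangerous shell characters
--     dangerous_chars = ['$', '`', '\\', '\n', '\r', ';', '&', '|', '>', '<']
--     sanitized = message
--     for char in dangerous_chars:
--         sanitized = sanitized.replace(char, '')
--
--     # Truncate to reasonable length
--     max_length = 200
--     if len(sanitized) > max_length:
--         sanitized = sanitized[:max_length] + "..."
--
--     # Ensure not empty after sanitization
--     if not sanitized.strip():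
--         sanitized = "Repository sync"
--
--     return sanitized.strip()
-- ===== SOURCE B (Python) =====
-- def validate_commit_message(message: str) -> str:
--     """Validate and sanitize commit message."""
--     dangerous = set('$`\\\n\r;&|><')
--     sanitized = ''.join(c for c in message if c not in dangerous)
--     if len(sanitized) > 200:
--         sanitized = sanitized[:200] + "..."
--     if not sanitized.strip():
--         sanitized = "Repository sync"
--     return sanitized.strip()
-- ===== Notes on version B (the rewrite author's own statement) =====
-- stated objective: idiomatic
-- what changed: Replaced the ten successive str.replace passes over the whole message with a single filtering pass that drops characters found in a precomputed set of dangerous characters; truncation, emptiness fallback and strip are unchanged.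
import Mathlib
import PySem

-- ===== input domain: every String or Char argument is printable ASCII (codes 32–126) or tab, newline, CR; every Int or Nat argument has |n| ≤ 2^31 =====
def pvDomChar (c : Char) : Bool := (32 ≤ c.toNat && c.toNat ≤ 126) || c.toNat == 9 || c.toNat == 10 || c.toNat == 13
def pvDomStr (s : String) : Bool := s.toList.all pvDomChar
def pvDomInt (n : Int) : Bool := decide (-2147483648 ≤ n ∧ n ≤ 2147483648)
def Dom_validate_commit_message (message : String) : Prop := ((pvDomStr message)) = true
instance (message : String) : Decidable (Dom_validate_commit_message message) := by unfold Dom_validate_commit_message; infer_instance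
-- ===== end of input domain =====

-- B replaces A's ten successive str.replace passes by a single filtering pass over the
-- message with a set of the dangerous characters (objective: idiomatic one-pass sanitize).

-- ===== PORT A =====
-- for char in dangerous_chars: sanitized = sanitized.replace(char, '')
def validate_commit_message (message : String) : String :=
  let dangerous_chars : List (List Char) := [['$'], ['`'], ['\\'], ['\n'], ['\r'], [';'], ['&'], ['|'], ['>'], ['<']]
  let sanitized := dangerous_chars.foldl (fun s ch => PySem.Chars.replace s ch []) message.toList
  let sanitized := if (sanitized.length : Int) > 200 then PySem.Chars.slice sanitized none (some 200) ++ "...".toList else sanitized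
  let sanitized := if PySem.Chars.strip sanitized = [] then "Repository sync".toList else sanitized
  String.ofList (PySem.Chars.strip sanitized)

-- ===== PORT B =====
-- sanitized = ''.join(c for c in message if c not in dangerous)
def validate_commit_message_alt (message : String) : String :=
  let dangerous : PySem.Set Char := PySem.Set.ofList "$`\\\n\r;&|><".toList
  let sanitized := message.toList.filter (fun c => !(PySem.Set.contains dangerous c))
  let sanitized := if (sanitized.length : Int) > 200 then PySem.Chars.slice sanitized none (some 200) ++ "...".toList else sanitized
  let sanitized := if PySem.Chars.strip sanitized = [] then "Repository sync".toList else sanitized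
  String.ofList (PySem.Chars.strip sanitized)

-- ===== PRECONDITION & SPEC =====
def Spec_validate_commit_message (message : String) (out : String) : Prop := out = validate_commit_message_alt message
instance (message : String) (out : String) : Decidable (Spec_validate_commit_message message out) := by unfold Spec_validate_commit_message; infer_instance

-- ===== CLAIM (what is proved, stated in full; the proofs are below) =====
def Claim_equal_validate_commit_message : Prop := ∀ (message : String), Dom_validate_commit_message message → Spec_validate_commit_message message (validate_commit_message message)

-- ===== LEMMAS AND PROOFS =====

-- replace.go with a single-char pattern and empty replacement removes every occurrence
theorem replace_go_single (c : Char) :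
    ∀ (l : List Char) (fuel : Nat) (acc : List Char), l.length ≤ fuel →
      PySem.Chars.replace.go [c] [] fuel l acc = acc.reverse ++ l.filter (fun x => !(x == c)) := by
  intro l
  induction l with
  | nil =>
    intro fuel acc _
    cases fuel <;> simp [PySem.Chars.replace.go]
  | cons c' t ih =>
    intro fuel acc h
    cases fuel with
    | zero => simp at h
    | succ f =>
      simp only [PySem.Chars.replace.go]
      by_cases hc : c = c'
      · subst hc
        simp only [List.isPrefixOf, BEq.rfl, Bool.true_and, if_true]
        rw [show List.drop [c].length (c :: t) = t from rfl]
        simp only [List.reverse_nil, List.nil_append]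
        rw [ih f acc (by simpa using h)]
        simp
      · have : [c].isPrefixOf (c' :: t) = false := by
          simp [List.isPrefixOf]
          exact fun hcc => absurd hcc hc
        rw [this]
        simp only [Bool.false_eq_true, if_false]
        rw [ih f (c' :: acc) (by simpa using h)]
        simp [Ne.symm hc]

theorem replace_single (c : Char) (s : List Char) :
    PySem.Chars.replace s [c] [] = s.filter (fun x => !(x == c)) := by
  have := replace_go_single c s s.length [] le_rfl
  simpa [PySem.Chars.replace] using this

theorem foldl_replace_singletons (ds : List Char) :
    ∀ s : List Char,
      (ds.map (fun c => [c])).foldl (fun s ch => PySem.Chars.replace s ch []) s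
        = s.filter (fun x => !(ds.contains x)) := by
  induction ds with
  | nil => intro s; simp
  | cons c ds ih =>
    intro s
    simp only [List.map_cons, List.foldl_cons]
    rw [replace_single, ih, List.filter_filter]
    apply List.filter_congr
    intro x _
    by_cases hx : x = c <;> simp [hx, Bool.and_comm]

-- ===== VERDICT (by name: the statement is the Claim_ definition above) =====

theorem validate_commit_message_spec : Claim_equal_validate_commit_message := by
  intro message _
  unfold Spec_validate_commit_message validate_commit_message validate_commit_message_alt
  have hset : PySem.Set.ofList "$`\\\n\r;&|><".toList = "$`\\\n\r;&|><".toList := by decide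
  have hlit : ([['$'], ['`'], ['\\'], ['\n'], ['\r'], [';'], ['&'], ['|'], ['>'], ['<']] : List (List Char))
      = ("$`\\\n\r;&|><".toList).map (fun c => [c]) := by decide
  simp only [hlit, foldl_replace_singletons, hset]
  rfl
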